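-- pv_equiv track=rewrite | github.com/karengs04/TeoriaDeLaInformaci-n | main.py | find_hash
-- ===== SOURCE A (Python) =====
-- def find_hash(received_hash, sent_hashes):
--     keys = list(sent_hashes.keys())
--     keys.sort()  # Ordena las claves para realizar la búsqueda binaria
--     left, right = 0, len(keys) - 1
--
--     while left <= right:
--         mid = (left + right) // 2
--         if keys[mid] == received_hash:
--             return keys[mid], sent_hashes[keys[mid]]
--         elif keys[mid] < received_hash:
--             left = mid + 1
--         else:
--             right = mid - 1
--
--     return None, None
-- ===== SOURCE B (Python) =====
-- def find_hash(received_hash, sent_hashes):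
--     if received_hash in sent_hashes:
--         return received_hash, sent_hashes[received_hash]
--     return None, None
-- ===== Notes on version B (the rewrite author's own statement) =====
-- stated objective: faster
-- what changed: Replaces A's sort-the-keys-then-binary-search with a single direct dict membership test and lookup, removing the sort and the search loop entirely.
import Mathlib
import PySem

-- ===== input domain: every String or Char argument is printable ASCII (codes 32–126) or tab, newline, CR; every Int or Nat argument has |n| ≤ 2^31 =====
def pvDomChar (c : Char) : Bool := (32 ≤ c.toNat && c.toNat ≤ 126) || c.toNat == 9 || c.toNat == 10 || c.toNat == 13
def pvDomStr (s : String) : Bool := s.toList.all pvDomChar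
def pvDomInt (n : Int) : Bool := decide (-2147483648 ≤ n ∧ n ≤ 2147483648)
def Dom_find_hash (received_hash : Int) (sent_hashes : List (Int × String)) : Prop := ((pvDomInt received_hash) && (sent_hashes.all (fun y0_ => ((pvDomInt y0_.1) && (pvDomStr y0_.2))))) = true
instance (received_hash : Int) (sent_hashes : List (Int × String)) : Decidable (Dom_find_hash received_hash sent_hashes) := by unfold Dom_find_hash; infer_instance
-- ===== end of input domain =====

-- B replaces A's sort-then-binary-search over the keys by a single direct dict lookup.

-- ===== PORT A =====
-- A's while loop over (left, right); the two 'none' matches are where Python would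
-- raise IndexError / KeyError — they never fire on the calls find_hash makes.
def pvLoopA (h : Int) (d : PySem.Dict Int String) (ks : List Int)
    (left right : Int) : Option Int × Option String :=
  if hlr : left ≤ right then
    let mid := PySem.Int.floordiv (left + right) 2
    have _hb := PySem.Int.floordiv_two_mid_bounds hlr
    match PySem.List.pyGet? ks mid with
    | none => (none, none)          -- IndexError: unreachable on find_hash's calls
    | some k =>
      if k = h then
        match d.get? k with
        | some v => (some k, some v)
        | none => (none, none)      -- KeyError: unreachable (k comes from d.keys)
      else if k < h then pvLoopA h d ks (mid + 1) right
      else pvLoopA h d ks left (mid - 1)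
  else (none, none)
termination_by (right + 1 - left).toNat
decreasing_by
  · omega
  · omega

def find_hash (received_hash : Int) (sent_hashes : List (Int × String)) : Option Int × Option String :=
  let d := PySem.Dict.ofList sent_hashes
  let keys := PySem.List.sorted d.keys (fun x => x) false
  pvLoopA received_hash d keys 0 (PySem.List.len keys - 1)

-- ===== PORT B =====
def find_hash_alt (received_hash : Int) (sent_hashes : List (Int × String)) : Option Int × Option String :=
  let d := PySem.Dict.ofList sent_hashes
  if d.contains received_hash then
    match d.get? received_hash with
    | some v => (some received_hash, some v)
    | none => (none, none)          -- KeyError: unreachable after the contains test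
  else (none, none)

-- ===== PRECONDITION & SPEC =====
def Spec_find_hash (received_hash : Int) (sent_hashes : List (Int × String)) (out : Option Int × Option String) : Prop := out = find_hash_alt received_hash sent_hashes
instance (received_hash : Int) (sent_hashes : List (Int × String)) (out : Option Int × Option String) : Decidable (Spec_find_hash received_hash sent_hashes out) := by unfold Spec_find_hash; infer_instance

-- ===== CLAIM (what is proved, stated in full; the proofs are below) =====
def Claim_equal_find_hash : Prop := ∀ (received_hash : Int) (sent_hashes : List (Int × String)), Dom_find_hash received_hash sent_hashes → Spec_find_hash received_hash sent_hashes (find_hash received_hash sent_hashes)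

-- ===== LEMMAS AND PROOFS =====

-- If no index in [left, right] holds h, A's loop returns (none, none).
lemma pvLoopA_notfound (h : Int) (d : PySem.Dict Int String) (ks : List Int) :
    ∀ left right : Int, 0 ≤ left → right < ks.length →
    (¬ ∃ i : Nat, left ≤ (i : Int) ∧ (i : Int) ≤ right ∧ ks[i]? = some h) →
    pvLoopA h d ks left right = (none, none) := by
  intro left right
  induction left, right using pvLoopA.induct h d ks with
  | case1 left right hlr mid hb hget =>
    intro h0 hlen _
    exfalso
    have hg := PySem.List.pyGet?_eq_some_getElem ks (i := mid) (by omega) (by omega)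
    rw [hg] at hget; simp at hget
  | case2 left right hlr mid hb v hget hv =>
    intro h0 hlen hno
    exfalso; apply hno
    have hg := PySem.List.pyGet?_eq_some_getElem ks (i := mid) (by omega) (by omega)
    rw [hg] at hget
    simp only [Option.some.injEq] at hget
    exact ⟨mid.toNat, by omega, by omega, by rw [List.getElem?_eq_getElem (by omega), hget]⟩
  | case3 left right hlr mid hb hget hv =>
    intro h0 hlen hno
    exfalso; apply hno
    have hg := PySem.List.pyGet?_eq_some_getElem ks (i := mid) (by omega) (by omega)
    rw [hg] at hget
    simp only [Option.some.injEq] at hget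
    exact ⟨mid.toNat, by omega, by omega, by rw [List.getElem?_eq_getElem (by omega), hget]⟩
  | case4 left right hlr mid hb k hk hne hlt ih =>
    intro h0 hlen hno
    rw [pvLoopA]; simp only [dif_pos hlr]; rw [hk]
    simp only [if_neg hne, if_pos hlt]
    exact ih (by omega) hlen (fun ⟨i, h1, h2, h3⟩ => hno ⟨i, by omega, by omega, h3⟩)
  | case5 left right hlr mid hb k hk hne hge ih =>
    intro h0 hlen hno
    rw [pvLoopA]; simp only [dif_pos hlr]; rw [hk]
    simp only [if_neg hne, if_neg hge]
    exact ih h0 (by omega) (fun ⟨i, h1, h2, h3⟩ => hno ⟨i, by omega, by omega, h3⟩)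
  | case6 left right hlr =>
    intro _ _ _
    rw [pvLoopA]; simp only [dif_neg hlr]

-- If h sits at an index in [left, right] of a strictly increasing ks whose elements
-- are keys of d, A's loop returns (some h, d[h]).
lemma pvLoopA_found (h : Int) (d : PySem.Dict Int String) (ks : List Int)
    (hsort : ks.Pairwise (· < ·)) (hsub : ∀ x ∈ ks, d.contains x = true) :
    ∀ left right : Int, 0 ≤ left → right < ks.length →
    (∃ i : Nat, left ≤ (i : Int) ∧ (i : Int) ≤ right ∧ ks[i]? = some h) →
    pvLoopA h d ks left right =
      (match d.get? h with
       | some v => (some h, some v)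
       | none => (none, none)) := by
  intro left right
  induction left, right using pvLoopA.induct h d ks with
  | case1 left right hlr mid hb hget =>
    intro h0 hlen _
    exfalso
    have hg := PySem.List.pyGet?_eq_some_getElem ks (i := mid) (by omega) (by omega)
    rw [hg] at hget; simp at hget
  | case2 left right hlr mid hb v hget hv =>
    intro h0 hlen _
    rw [pvLoopA]; simp only [dif_pos hlr]; rw [hget, hv]
    simp [hv]
  | case3 left right hlr mid hb hget hv =>
    intro h0 hlen _
    exfalso
    have hmem : h ∈ ks := PySem.List.mem_of_pyGet?_eq_some ks hget
    have := hsub h hmem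
    rw [(PySem.Dict.get?_eq_none_iff_contains d h).mp hv] at this
    exact Bool.noConfusion this
  | case4 left right hlr mid hb k hk hne hlt ih =>
    intro h0 hlen hex
    rw [pvLoopA]; simp only [dif_pos hlr]; rw [hk]
    simp only [if_neg hne, if_pos hlt]
    apply ih (by omega) hlen
    obtain ⟨i, h1, h2, h3⟩ := hex
    refine ⟨i, ?_, by omega, h3⟩
    -- i must exceed mid: ks[mid] = k < h = ks[i], ks strictly increasing
    by_contra hle
    have hi : i < ks.length := by
      have := List.getElem?_eq_some_iff.mp h3; omega
    have hg := PySem.List.pyGet?_eq_some_getElem ks (i := mid) (by omega) (by omega)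
    rw [hg] at hk
    simp only [Option.some.injEq] at hk
    have h3' : ks[i] = h := by
      rw [List.getElem?_eq_getElem hi] at h3
      exact Option.some_injective _ h3
    rcases Nat.lt_or_ge i mid.toNat with hcase | hcase
    · have := (List.pairwise_iff_getElem.mp hsort) i mid.toNat hi (by omega) hcase
      rw [h3', hk] at this
      omega
    · have heq : i = mid.toNat := by omega
      subst heq
      exact hne (by rw [← hk]; exact h3')
  | case5 left right hlr mid hb k hk hne hge ih =>
    intro h0 hlen hex
    rw [pvLoopA]; simp only [dif_pos hlr]; rw [hk]
    simp only [if_neg hne, if_neg hge]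
    apply ih h0 (by omega)
    obtain ⟨i, h1, h2, h3⟩ := hex
    refine ⟨i, h1, ?_, h3⟩
    -- i must be below mid: h = ks[i] < ks[mid] = k since ¬ k < h and k ≠ h
    by_contra hle
    have hi : i < ks.length := by
      have := List.getElem?_eq_some_iff.mp h3; omega
    have hg := PySem.List.pyGet?_eq_some_getElem ks (i := mid) (by omega) (by omega)
    rw [hg] at hk
    simp only [Option.some.injEq] at hk
    have h3' : ks[i] = h := by
      rw [List.getElem?_eq_getElem hi] at h3
      exact Option.some_injective _ h3
    rcases Nat.lt_or_ge mid.toNat i with hcase | hcase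
    · have := (List.pairwise_iff_getElem.mp hsort) mid.toNat i (by omega) hi hcase
      rw [h3', hk] at this
      exact hge this
    · have heq : i = mid.toNat := by omega
      subst heq
      exact hne (by rw [← hk]; exact h3')
  | case6 left right hlr =>
    intro _ _ hex
    obtain ⟨i, h1, h2, _⟩ := hex
    omega

-- ===== VERDICT (by name: the statement is the Claim_ definition above) =====
theorem find_hash_spec : Claim_equal_find_hash := by
  intro h s _
  unfold Spec_find_hash
  have hA : find_hash h s = pvLoopA h (PySem.Dict.ofList s)
      (PySem.List.sorted (PySem.Dict.ofList s).keys (fun x => x) false) 0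
      (PySem.List.len (PySem.List.sorted (PySem.Dict.ofList s).keys (fun x => x) false) - 1) := rfl
  have hAlt : find_hash_alt h s =
      (if (PySem.Dict.ofList s).contains h then
        (match (PySem.Dict.ofList s).get? h with
         | some v => (some h, some v)
         | none => (none, none))
      else (none, none)) := rfl
  rw [hA, hAlt]
  set d := PySem.Dict.ofList s with hd
  set ks := PySem.List.sorted d.keys (fun x => x) false with hks
  have hperm : ks.Perm d.keys := PySem.List.sorted_perm d.keys (fun x => x) false
  have hnd : ks.Nodup := hperm.nodup_iff.mpr (PySem.Dict.nodup_keys_ofList s)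
  have hsort : ks.Pairwise (· < ·) := by
    have hle : ks.Pairwise (fun a b => a ≤ b) := PySem.List.sorted_pairwise d.keys (fun x => x)
    exact (hle.and hnd).imp (fun hab => lt_of_le_of_ne hab.1 hab.2)
  have hsub : ∀ x ∈ ks, d.contains x = true := by
    intro x hx
    exact (PySem.Dict.contains_iff_mem_keys d x).mpr (hperm.mem_iff.mp hx)
  rw [PySem.List.len_eq]
  by_cases hmem : h ∈ ks
  · obtain ⟨i, hi, hgi⟩ := List.getElem_of_mem hmem
    rw [pvLoopA_found h d ks hsort hsub 0 ((ks.length : Int) - 1) le_rfl (by omega)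
      ⟨i, by omega, by omega, by rw [List.getElem?_eq_getElem hi, hgi]⟩]
    have hc : d.contains h = true := hsub h hmem
    rw [if_pos hc]
  · rw [pvLoopA_notfound h d ks 0 ((ks.length : Int) - 1) le_rfl (by omega) ?side]
    case side =>
      rintro ⟨i, h1, h2, h3⟩
      exact hmem (List.mem_of_getElem? h3)
    have hc : d.contains h = false := by
      by_contra hcc
      exact hmem (hperm.mem_iff.mpr ((PySem.Dict.contains_iff_mem_keys d h).mp (by
        cases hcb : d.contains h
        · exact absurd hcb hcc
        · rfl)))
    rw [if_neg (by simp [hc])]
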